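-- pv_equiv track=rewrite | github.com/aemartinez/chorgram | cc/inter_closure.py | make_tuples
-- ===== SOURCE A (Python) =====
-- import itertools
--
-- def make_tuples(local_threads):
--     principals = local_threads.keys()
--     tuples = []
--     elems = [[(p, t) for t in local_threads[p]] for p in principals]
--     gr_tuples = list(itertools.product(*elems))
--     for gr in gr_tuples:
--         tpl = {}
--         for e in gr:
--             tpl[e[0]] = e[1]
--         tuples.append(tpl)
--     return tuples
-- ===== SOURCE B (Python) =====
-- def make_tuples(local_threads):
--     # Incremental fold: extend each partial assignment dict by one principal at a time
--     # (last principal varies fastest, matching itertools.product's enumeration order).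
--     result = [{}]
--     for p, ts in local_threads.items():
--         result = [{**d, p: t} for d in result for t in ts]
--     return result
-- ===== Notes on version B (the rewrite author's own statement) =====
-- stated objective: simpler
-- what changed: Replaces itertools.product over per-principal (principal, thread) pair lists plus a second dict-rebuilding pass by a single incremental fold that extends each partial assignment dict one principal at a time.
import Mathlib
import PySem

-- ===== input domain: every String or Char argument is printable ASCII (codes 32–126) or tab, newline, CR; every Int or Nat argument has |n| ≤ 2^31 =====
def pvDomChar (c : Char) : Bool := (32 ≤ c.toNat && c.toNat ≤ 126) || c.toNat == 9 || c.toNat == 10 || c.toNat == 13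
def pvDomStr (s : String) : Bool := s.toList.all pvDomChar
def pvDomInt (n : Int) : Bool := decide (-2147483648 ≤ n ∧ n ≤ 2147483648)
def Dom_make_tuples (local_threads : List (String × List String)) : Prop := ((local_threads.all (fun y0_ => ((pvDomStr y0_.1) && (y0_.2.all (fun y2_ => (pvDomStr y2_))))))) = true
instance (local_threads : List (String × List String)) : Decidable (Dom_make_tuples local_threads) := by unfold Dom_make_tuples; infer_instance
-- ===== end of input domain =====

-- B replaces itertools.product over per-principal pair lists plus a dict-rebuilding pass
-- by a single incremental fold extending partial assignment dicts (objective: simpler).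

-- ===== PORT A =====
-- local_threads[p]: first-match lookup in the association list (exact: p is always a present key)
def pyLookup (lt : List (String × List String)) (p : String) : List String :=
  (PySem.Dict.mk lt).getD p []

-- itertools.product(*elems): rightmost factor varies fastest
def pyProduct : List (List (String × String)) → List (List (String × String))
  | [] => [[]]
  | xs :: rest => xs.flatMap (fun a => (pyProduct rest).map (a :: ·))

def make_tuples (local_threads : List (String × List String)) : List (List (String × String)) :=
  let principals := local_threads.map Prod.fst     -- .keys() (unique under Pre_)
  let elems := principals.map (fun p => (pyLookup local_threads p).map (fun t => (p, t)))
  let gr_tuples := pyProduct elems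
  gr_tuples.foldl (fun tuples gr =>
    tuples ++ [(gr.foldl (fun tpl e => tpl.insert e.1 e.2) PySem.Dict.empty).items]) []

-- ===== PORT B =====
-- result = [{}]; for p, ts in local_threads.items(): result = [{**d, p: t} for d in result for t in ts]
-- {**d, p: t} appends the fresh key p (exact: p is never already in d under Pre_)
def make_tuples_alt (local_threads : List (String × List String)) : List (List (String × String)) :=
  local_threads.foldl
    (fun result pt => result.flatMap (fun d => pt.2.map (fun t => d ++ [(pt.1, t)])))
    [[]]

-- ===== PRECONDITION & SPEC =====
-- Pre_ excludes association lists with duplicate keys: those never arise from a Python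
-- dict, and which of the duplicate entries counts is an artefact of the representation.
def Pre_make_tuples (local_threads : List (String × List String)) : Prop :=
  (local_threads.map Prod.fst).Nodup

instance (local_threads : List (String × List String)) : Decidable (Pre_make_tuples local_threads) := by
  unfold Pre_make_tuples; infer_instance

def pvWitness_make_tuples : (List (String × List String)) :=
  [("a", ["1", "2"]), ("b", ["x"])]

def Spec_make_tuples (local_threads : List (String × List String)) (out : List (List (String × String))) : Prop := out = make_tuples_alt local_threads
instance (local_threads : List (String × List String)) (out : List (List (String × String))) : Decidable (Spec_make_tuples local_threads out) := by unfold Spec_make_tuples; infer_instance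

-- ===== CLAIM (what is proved, stated in full; the proofs are below) =====
def Claim_equal_make_tuples : Prop := ∀ (local_threads : List (String × List String)), Dom_make_tuples local_threads → Pre_make_tuples local_threads → Spec_make_tuples local_threads (make_tuples local_threads)

-- ===== LEMMAS AND PROOFS =====

-- the appending foldl of A's outer loop is a map
theorem foldl_append_map {α β : Type} (f : α → β) :
    ∀ (l : List α) (acc : List β),
      l.foldl (fun a x => a ++ [f x]) acc = acc ++ l.map f := by
  intro l
  induction l with
  | nil => simp
  | cons x xs ih => intro acc; simp [List.foldl_cons, ih]

-- every tuple produced by the product over per-principal pair lists carries the keys in order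
theorem pyProduct_fst (g : String × List String → List String) :
    ∀ (L : List (String × List String)) (r : List (String × String)),
      r ∈ pyProduct (L.map (fun pt => (g pt).map (fun t => (pt.1, t)))) →
      r.map Prod.fst = L.map Prod.fst := by
  intro L
  induction L with
  | nil =>
      intro r hr
      simp [pyProduct] at hr
      simp [hr]
  | cons pt L ih =>
      intro r hr
      simp only [List.map_cons, pyProduct, List.mem_flatMap, List.mem_map] at hr
      obtain ⟨a, ha, r', hr', rfl⟩ := hr
      obtain ⟨t, _, rfl⟩ := ha
      simp [ih r' hr']

-- dict-building over a tuple with distinct fresh keys returns the tuple itself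
theorem dictify_eq_self (gr : List (String × String)) (h : (gr.map Prod.fst).Nodup) :
    (gr.foldl (fun tpl e => tpl.insert e.1 e.2) PySem.Dict.empty).items = gr := by
  have := PySem.Dict.items_foldl_insert_fresh (l := gr) (k := Prod.fst) (v := Prod.snd)
    (d := PySem.Dict.empty) (by intro a _; simp) h
  simpa using this

-- B's fold computes the product, with each partial dict extended on the right
theorem foldB_eq :
    ∀ (L : List (String × List String)) (res : List (List (String × String))),
      L.foldl (fun result pt => result.flatMap (fun d => pt.2.map (fun t => d ++ [(pt.1, t)]))) res
        = res.flatMap (fun d =>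
            (pyProduct (L.map (fun pt => pt.2.map (fun t => (pt.1, t))))).map (fun r => d ++ r)) := by
  intro L
  induction L with
  | nil => intro res; simp [pyProduct]
  | cons pt L ih =>
      intro res
      simp only [List.foldl_cons, ih, List.map_cons, pyProduct]
      simp [List.flatMap_assoc, List.map_flatMap, List.flatMap_map, List.map_map,
        Function.comp_def, List.append_assoc]

-- under Pre_, the first-match lookup of a present key returns its own value
theorem pyLookup_mem (lt : List (String × List String)) (hn : (lt.map Prod.fst).Nodup)
    (pt : String × List String) (hm : pt ∈ lt) : pyLookup lt pt.1 = pt.2 := by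
  unfold pyLookup
  exact PySem.Dict.getD_of_mem_items (d := PySem.Dict.mk lt) (by simpa using hm) (by simpa using hn) []

-- ===== VERDICT (by name: the statement is the Claim_ definition above) =====
theorem make_tuples_spec : Claim_equal_make_tuples := by
  intro lt _ hpre
  unfold Spec_make_tuples make_tuples make_tuples_alt
  simp only []
  have hg : ∀ pt ∈ lt, pyLookup lt pt.1 = pt.2 := fun pt hm => pyLookup_mem lt hpre pt hm
  -- rewrite A's elems into the canonical per-principal pair lists
  have helems :
      (lt.map Prod.fst).map (fun p => (pyLookup lt p).map (fun t => (p, t)))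
        = lt.map (fun pt => (pyLookup lt pt.1).map (fun t => (pt.1, t))) := by
    simp [List.map_map, Function.comp]
  rw [helems]
  rw [foldl_append_map]
  rw [foldB_eq]
  have hprod :
      lt.map (fun pt => pt.2.map (fun t => (pt.1, t)))
        = lt.map (fun pt => (pyLookup lt pt.1).map (fun t => (pt.1, t))) := by
    apply List.map_congr_left
    intro pt hm
    rw [hg pt hm]
  rw [← hprod]
  -- A side: dictifying each product tuple is the identity (keys are Nodup by Pre_)
  have hkeys : ∀ r ∈ pyProduct (lt.map (fun pt => pt.2.map (fun t => (pt.1, t)))),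
      (r.map Prod.fst).Nodup := by
    intro r hr
    rw [pyProduct_fst (g := Prod.snd) lt r (by simpa using hr)]
    exact hpre
  have hA : (pyProduct (lt.map (fun pt => pt.2.map (fun t => (pt.1, t))))).map
        (fun gr => (gr.foldl (fun tpl e => tpl.insert e.1 e.2) PySem.Dict.empty).items)
      = pyProduct (lt.map (fun pt => pt.2.map (fun t => (pt.1, t)))) := by
    have := List.map_congr_left (l := pyProduct (lt.map (fun pt => pt.2.map (fun t => (pt.1, t)))))
      (f := fun gr => (gr.foldl (fun tpl e => tpl.insert e.1 e.2) PySem.Dict.empty).items)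
      (g := id) (fun gr hm => dictify_eq_self gr (hkeys gr hm))
    simpa using this
  simp [hA]
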